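-- pv_equiv track=rewrite | github.com/shuttlego/shuttlego.github.io | scripts/fill_stop_geo.py | build_consecutive_gaps
-- ===== SOURCE A (Python) =====
-- def build_consecutive_gaps(
--     missing_list: list[tuple[str, int, int, str, str, str, int]],
-- ) -> list[tuple[int, int, int, str, str, list[tuple[int, str]], str, int]]:
--     """연속으로 정보가 없는 정류장 구간(gap) 목록 반환.
--     반환: [(route_id, seq_start, seq_end, prev_name, next_name, [(seq, stop_name), ...], route_name, route_type), ...]
--     """
--     by_route: dict[int, list[tuple[int, str, str, str, str, str, int]]] = {}
--     for stop_name, route_id, sequence, route_name, prev_name, next_name, route_type in missing_list: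
--         by_route.setdefault(route_id, []).append(
--             (sequence, stop_name, route_name, prev_name, next_name, route_type)
--         )
--     gaps: list[tuple[int, int, int, str, str, list[tuple[int, str]], str, int]] = []
--     for route_id, rows in by_route.items():
--         rows.sort(key=lambda r: r[0])
--         i = 0
--         while i < len(rows):
--             seq_start = rows[i][0]
--             seq_end = seq_start
--             stops_in_gap: list[tuple[int, str]] = [(rows[i][0], rows[i][1])]
--             prev_name = rows[i][3]
--             next_name = rows[i][4]
--             route_name = rows[i][2]
--             route_type = rows[i][5]
--             j = i + 1
--             while j < len(rows) and rows[j][0] == seq_end + 1: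
--                 seq_end = rows[j][0]
--                 stops_in_gap.append((rows[j][0], rows[j][1]))
--                 next_name = rows[j][4]
--                 j += 1
--             gaps.append((route_id, seq_start, seq_end, prev_name, next_name, stops_in_gap, route_name, route_type))
--             i = j
--     return gaps
-- ===== SOURCE B (Python) =====
-- def build_consecutive_gaps(
--     missing_list: list[tuple[str, int, int, str, str, str, int]],
-- ) -> list[tuple[int, int, int, str, str, list[tuple[int, str]], str, int]]:
--     by_route: dict[int, list[tuple[int, str, str, str, str, int]]] = {}
--     for stop_name, route_id, sequence, route_name, prev_name, next_name, route_type in missing_list: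
--         by_route.setdefault(route_id, []).append(
--             (sequence, stop_name, route_name, prev_name, next_name, route_type)
--         )
--     gaps: list[tuple[int, int, int, str, str, list[tuple[int, str]], str, int]] = []
--     for route_id, rows in by_route.items():
--         srt = sorted(rows, key=lambda r: r[0])
--         # boundary pass: index k starts a run iff k == 0 or the +1 chain breaks at k
--         starts = [k for k in range(len(srt)) if k == 0 or srt[k][0] != srt[k - 1][0] + 1]
--         # pair every run start with the next start (or the end) and slice the run out
--         for s, e in zip(starts, starts[1:] + [len(srt)]):
--             run = srt[s:e]
--             first, last = run[0], run[-1]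
--             gaps.append((route_id, first[0], last[0], first[3], last[4],
--                          [(r[0], r[1]) for r in run], first[2], first[5]))
--     return gaps
-- ===== Notes on version B (the rewrite author's own statement) =====
-- stated objective: alternative
-- what changed: Replaces A's online nested while-loops (mutable seq_end/next_name merging rows one by one) with a staged pipeline: a boundary pass computes all run-start indices by a pairwise +1 test over the sorted rows, then each start is zipped with the next start and the run is taken as a list slice, assembled from its first and last rows.
import Mathlib
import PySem

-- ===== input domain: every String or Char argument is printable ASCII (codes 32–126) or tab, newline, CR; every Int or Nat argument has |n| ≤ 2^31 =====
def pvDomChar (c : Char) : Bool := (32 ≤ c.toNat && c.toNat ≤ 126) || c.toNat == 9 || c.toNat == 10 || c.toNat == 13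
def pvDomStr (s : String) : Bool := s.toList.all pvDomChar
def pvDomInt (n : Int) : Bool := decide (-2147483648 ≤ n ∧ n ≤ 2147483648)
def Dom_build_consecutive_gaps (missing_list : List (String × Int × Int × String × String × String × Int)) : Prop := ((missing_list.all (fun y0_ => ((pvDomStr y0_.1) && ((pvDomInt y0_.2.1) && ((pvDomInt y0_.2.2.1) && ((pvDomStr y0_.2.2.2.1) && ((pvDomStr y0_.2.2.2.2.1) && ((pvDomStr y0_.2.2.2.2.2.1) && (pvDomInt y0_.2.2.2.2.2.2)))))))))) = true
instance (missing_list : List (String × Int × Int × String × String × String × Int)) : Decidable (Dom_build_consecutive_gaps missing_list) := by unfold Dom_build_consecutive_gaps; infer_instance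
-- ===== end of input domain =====

-- B replaces A's online nested while-loops (mutable seq_end/next_name merging) with staged
-- passes: a boundary pass computing all run-start indices, then zip-with-next and list
-- slicing (objective: alternative decomposition; return value only — neither version mutates its argument).

-- row = (sequence, stop_name, route_name, prev_name, next_name, route_type)
abbrev pvRow := Int × String × String × String × String × Int
abbrev pvGap := Int × Int × Int × String × String × (List (Int × String)) × String × Int

-- ===== PORT A =====
-- shared by both ports: the identical grouping loop of both Pythons (setdefault(...).append(row))
def pvRowOf (x : String × Int × Int × String × String × String × Int) : pvRow :=
  (x.2.2.1, x.1, x.2.2.2.1, x.2.2.2.2.1, x.2.2.2.2.2.1, x.2.2.2.2.2.2)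

def pvByRoute (ml : List (String × Int × Int × String × String × String × Int)) :
    PySem.Dict Int (List pvRow) :=
  ml.foldl (fun d x => d.modify x.2.1 [] (· ++ [pvRowOf x])) (PySem.Dict.mk [])

-- inner 'while j < len(rows) and rows[j][0] == seq_end + 1' loop, over the suffix from j;
-- state (seq_end, stops_in_gap, next_name); also returns the remaining suffix (= index j)
def pvRunA : List pvRow → Int → List (Int × String) → String →
    (Int × List (Int × String) × String × List pvRow)
  | [], se, acc, nn => (se, acc, nn, [])
  | r :: rest, se, acc, nn =>
    if r.1 = se + 1 then pvRunA rest r.1 (acc ++ [(r.1, r.2.1)]) r.2.2.2.2.1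
    else (se, acc, nn, r :: rest)

theorem pvRunA_len_le (xs : List pvRow) (se : Int) (acc : List (Int × String)) (nn : String) :
    (pvRunA xs se acc nn).2.2.2.length ≤ xs.length := by
  induction xs generalizing se acc nn with
  | nil => simp [pvRunA]
  | cons r rest ih =>
    simp only [pvRunA]
    split
    · exact le_trans (ih _ _ _) (by simp)
    · simp

-- outer 'while i < len(rows)' loop over the suffix from i
def pvOuterA (route : Int) : List pvRow → List pvGap
  | [] => []
  | r :: rest =>
    let t := pvRunA rest r.1 [(r.1, r.2.1)] r.2.2.2.2.1
    (route, r.1, t.1, r.2.2.2.1, t.2.2.1, t.2.1, r.2.2.1, r.2.2.2.2.2) :: pvOuterA route t.2.2.2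
termination_by l => l.length
decreasing_by
  exact Nat.lt_succ_of_le (pvRunA_len_le _ _ _ _)

def build_consecutive_gaps (missing_list : List (String × Int × Int × String × String × String × Int)) : List (Int × Int × Int × String × String × (List (Int × String)) × String × Int) :=
  (pvByRoute missing_list).items.foldl
    (fun gaps kv => gaps ++ pvOuterA kv.1 (PySem.List.sorted kv.2 (fun r => r.1))) []

-- ===== PORT B =====
def pvDfltRow : pvRow := (0, "", "", "", "", 0)

-- '[k for k in range(len(srt)) if k == 0 or srt[k][0] != srt[k-1][0] + 1]';
-- srt[k] and srt[k-1] are always in range here (k < len, and k ≥ 1 by the short-circuit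
-- 'or'), so getD with a default row is exact
def pvStarts (l : List pvRow) : List Nat :=
  (List.range l.length).filter (fun k =>
    k == 0 || ((l.getD k pvDfltRow).1 != (l.getD (k - 1) pvDfltRow).1 + 1))

-- 'zip(starts, starts[1:] + [len(srt)])'
def pvPairs (l : List pvRow) : List (Nat × Nat) :=
  (pvStarts l).zip ((pvStarts l).tail ++ [l.length])

-- gap tuple from run[0] and run[-1] (every sliced run is nonempty)
def pvGapB (route : Int) (run : List pvRow) : pvGap :=
  match run.head?, run.getLast? with
  | some first, some last =>
    (route, first.1, last.1, first.2.2.2.1, last.2.2.2.2.1,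
     run.map (fun r => (r.1, r.2.1)), first.2.2.1, first.2.2.2.2.2)
  | _, _ => (route, 0, 0, "", "", [], "", 0)   -- unreachable (run[0] of an empty run)

-- 'srt[s:e]' with 0 ≤ s ≤ e ≤ len(srt) is exactly drop s / take (e - s)
def build_consecutive_gaps_alt (missing_list : List (String × Int × Int × String × String × String × Int)) : List (Int × Int × Int × String × String × (List (Int × String)) × String × Int) :=
  (pvByRoute missing_list).items.foldl
    (fun gaps kv =>
      let srt := PySem.List.sorted kv.2 (fun r => r.1)
      gaps ++ (pvPairs srt).map (fun se => pvGapB kv.1 ((srt.drop se.1).take (se.2 - se.1)))) []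

-- ===== PRECONDITION & SPEC =====
def Spec_build_consecutive_gaps (missing_list : List (String × Int × Int × String × String × String × Int)) (out : List (Int × Int × Int × String × String × (List (Int × String)) × String × Int)) : Prop := out = build_consecutive_gaps_alt missing_list
instance (missing_list : List (String × Int × Int × String × String × String × Int)) (out : List (Int × Int × Int × String × String × (List (Int × String)) × String × Int)) : Decidable (Spec_build_consecutive_gaps missing_list out) := by
  unfold Spec_build_consecutive_gaps
  -- stepwise letI: the one-shot instance search exceeds its size limit on this nested tuple type
  letI i0 : DecidableEq (List (Int × String)) := inferInstance
  letI i1 : DecidableEq ((List (Int × String)) × String × Int) := inferInstance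
  letI i2 : DecidableEq (String × (List (Int × String)) × String × Int) := inferInstance
  letI i3 : DecidableEq (String × String × (List (Int × String)) × String × Int) := inferInstance
  letI i4 : DecidableEq (Int × String × String × (List (Int × String)) × String × Int) := inferInstance
  letI i5 : DecidableEq (Int × Int × String × String × (List (Int × String)) × String × Int) := inferInstance
  letI i6 : DecidableEq (Int × Int × Int × String × String × (List (Int × String)) × String × Int) := inferInstance
  infer_instance

-- ===== CLAIM (what is proved, stated in full; the proofs are below) =====
def Claim_equal_build_consecutive_gaps : Prop := ∀ (missing_list : List (String × Int × Int × String × String × String × Int)), Dom_build_consecutive_gaps missing_list → Spec_build_consecutive_gaps missing_list (build_consecutive_gaps missing_list)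

-- ===== LEMMAS AND PROOFS =====

-- reference splitter: pvTakeRun prev xs = (maximal chain prev+1, prev+2, …, rest)
def pvTakeRun (prev : Int) : List pvRow → List pvRow × List pvRow
  | [] => ([], [])
  | r :: rest =>
    if r.1 = prev + 1 then
      let p := pvTakeRun r.1 rest
      (r :: p.1, p.2)
    else ([], r :: rest)

theorem pvTakeRun_len_le (prev : Int) (xs : List pvRow) :
    (pvTakeRun prev xs).2.length ≤ xs.length := by
  induction xs generalizing prev with
  | nil => simp [pvTakeRun]
  | cons r rest ih =>
    simp only [pvTakeRun]
    split
    · exact le_trans (ih _) (by simp)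
    · simp

theorem pvTakeRun_append (prev : Int) (xs : List pvRow) :
    (pvTakeRun prev xs).1 ++ (pvTakeRun prev xs).2 = xs := by
  induction xs generalizing prev with
  | nil => simp [pvTakeRun]
  | cons r rest ih =>
    simp only [pvTakeRun]
    split
    · simpa using ih _
    · simp

def pvSplitRuns : List pvRow → List (List pvRow)
  | [] => []
  | r :: rest => (r :: (pvTakeRun r.1 rest).1) :: pvSplitRuns (pvTakeRun r.1 rest).2
termination_by l => l.length
decreasing_by
  exact Nat.lt_succ_of_le (pvTakeRun_len_le _ _)

-- A's inner loop computed by the reference splitter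
theorem pvRunA_eq (xs : List pvRow) (se : Int) (acc : List (Int × String)) (nn : String) :
    pvRunA xs se acc nn =
      ( ((pvTakeRun se xs).1.getLast?).elim se (·.1),
        acc ++ (pvTakeRun se xs).1.map (fun r => (r.1, r.2.1)),
        ((pvTakeRun se xs).1.getLast?).elim nn (fun r => r.2.2.2.2.1),
        (pvTakeRun se xs).2 ) := by
  induction xs generalizing se acc nn with
  | nil => simp [pvRunA, pvTakeRun]
  | cons r rest ih =>
    simp only [pvRunA, pvTakeRun]
    split
    · rw [ih]
      cases h : (pvTakeRun r.1 rest).1 with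
      | nil => simp
      | cons y t =>
        cases hz : (y :: t).getLast? with
        | none => simp at hz
        | some z => simp [hz]
    · simp

-- A's outer loop = map the gap builder over the reference runs
theorem pvOuterA_eq (route : Int) (l : List pvRow) :
    pvOuterA route l = (pvSplitRuns l).map (pvGapB route) := by
  induction l using pvSplitRuns.induct with
  | case1 => simp [pvOuterA, pvSplitRuns]
  | case2 r rest ih =>
    rw [pvSplitRuns]
    simp only [pvOuterA, pvRunA_eq, List.map_cons]
    refine congrArg₂ _ ?_ (by simpa using ih)
    cases h : (pvTakeRun r.1 rest).1 with
    | nil => simp [pvGapB]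
    | cons y t =>
      cases hz : (y :: t).getLast? with
      | none => simp at hz
      | some z => simp [hz, pvGapB, List.getLast?_cons_cons]

-- recursive characterisation of B's boundary pass, local indices, virtual previous row r
def pvStartsAux (r : pvRow) : List pvRow → List Nat
  | [] => []
  | x :: rest =>
    if x.1 = r.1 + 1 then (pvStartsAux x rest).map (· + 1)
    else 0 :: (pvStartsAux x rest).map (· + 1)

theorem pvStarts_shift (l : List pvRow) (r : pvRow) :
    (List.range l.length).filter
      (fun j => (l.getD j pvDfltRow).1 != ((r :: l).getD j pvDfltRow).1 + 1) = pvStartsAux r l := by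
  induction l generalizing r with
  | nil => simp [pvStartsAux]
  | cons x rest ih =>
    have hc : ((fun j => ((x :: rest).getD j pvDfltRow).1 != ((r :: x :: rest).getD j pvDfltRow).1 + 1) ∘ Nat.succ)
        = (fun j => (rest.getD j pvDfltRow).1 != ((x :: rest).getD j pvDfltRow).1 + 1) := by
      funext j; rfl
    show (List.range (rest.length + 1)).filter _ = _
    rw [List.range_succ_eq_map, List.filter_cons, List.filter_map, hc, ih x]
    by_cases hx : x.1 = r.1 + 1
    · simp [pvStartsAux, hx]
    · simp [pvStartsAux, hx]

theorem pvStarts_cons (r : pvRow) (l : List pvRow) :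
    pvStarts (r :: l) = 0 :: (pvStartsAux r l).map (· + 1) := by
  unfold pvStarts
  have hc : ((fun k => (k == 0 || ((r :: l).getD k pvDfltRow).1 != ((r :: l).getD (k - 1) pvDfltRow).1 + 1)) ∘ Nat.succ)
      = (fun j => (l.getD j pvDfltRow).1 != ((r :: l).getD j pvDfltRow).1 + 1) := by
    funext j; rfl
  rw [List.length_cons, List.range_succ_eq_map, List.filter_cons, List.filter_map, hc,
    pvStarts_shift]
  simp

theorem pvStartsAux_eq (l : List pvRow) (r : pvRow) :
    pvStartsAux r l = (pvStarts (pvTakeRun r.1 l).2).map (· + (pvTakeRun r.1 l).1.length) := by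
  induction l generalizing r with
  | nil => simp [pvStartsAux, pvTakeRun, pvStarts]
  | cons x rest ih =>
    simp only [pvStartsAux, pvTakeRun]
    by_cases hx : x.1 = r.1 + 1
    · simp only [hx, ih x, List.map_map]
      simp
    · simp [hx, pvStarts_cons]

theorem pvStarts_run (r : pvRow) (l : List pvRow) :
    pvStarts (r :: l) =
      0 :: (pvStarts (pvTakeRun r.1 l).2).map (· + ((pvTakeRun r.1 l).1.length + 1)) := by
  rw [pvStarts_cons, pvStartsAux_eq, List.map_map]
  simp

theorem pvZip_map_add (m : Nat) (a b : List Nat) :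
    (a.map (· + m)).zip (b.map (· + m)) = (a.zip b).map (fun p => (p.1 + m, p.2 + m)) := by
  rw [List.zip_map]
  rfl

-- B's staged passes compute the gap of every reference run
theorem pvPerRouteB (route : Int) (l : List pvRow) :
    (pvPairs l).map (fun se => pvGapB route ((l.drop se.1).take (se.2 - se.1))) =
      (pvSplitRuns l).map (pvGapB route) := by
  induction l using pvSplitRuns.induct with
  | case1 => simp [pvPairs, pvStarts, pvSplitRuns]
  | case2 r rest ih =>
    rcases htr : pvTakeRun r.1 rest with ⟨run, rest2⟩
    simp only [htr] at ih
    have happ : run ++ rest2 = rest := by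
      have h := pvTakeRun_append r.1 rest
      rw [htr] at h
      simpa using h
    have hsplit : r :: rest = (r :: run) ++ rest2 := by simp [← happ]
    have hstarts : pvStarts (r :: rest) = 0 :: (pvStarts rest2).map (· + (run.length + 1)) := by
      have h := pvStarts_run r rest
      rw [htr] at h
      simpa using h
    rw [pvSplitRuns]
    simp only [htr, List.map_cons]
    cases hr2 : rest2 with
    | nil =>
      have hrr : rest = run := by rw [← happ, hr2, List.append_nil]
      have hs : pvStarts (r :: rest) = [0] := by rw [hstarts, hr2]; simp [pvStarts]
      have hp : pvPairs (r :: rest) = [(0, (r :: rest).length)] := by simp [pvPairs, hs]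
      rw [hp, List.map_cons, List.map_nil]
      simp [pvSplitRuns, hrr]
    | cons y t =>
      obtain ⟨T, hT⟩ : ∃ T, pvStarts rest2 = 0 :: T := ⟨_, by rw [hr2, pvStarts_cons]⟩
      have hN : (r :: rest).length = rest2.length + (run.length + 1) := by
        have := congrArg List.length happ
        simp only [List.length_append] at this
        simp only [List.length_cons]
        omega
      have hp : pvPairs (r :: rest) = (0, run.length + 1) ::
          (pvPairs rest2).map (fun p => (p.1 + (run.length + 1), p.2 + (run.length + 1))) := by
        unfold pvPairs
        rw [hstarts, hT, hN]
        simp only [List.map_cons, List.tail_cons, List.cons_append, List.zip_cons_cons]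
        congr 1
        · simp
        · rw [← pvZip_map_add]
          simp [List.map_append, List.map_cons]
      rw [← hr2, hp, List.map_cons]
      congr 1
      · -- the head pair slices out the first run
        have hh : ((r :: rest).drop 0).take ((run.length + 1) - 0) = r :: run := by
          rw [hsplit, List.drop_zero]
          have : run.length + 1 - 0 = (r :: run).length := by simp
          rw [this, List.take_left]
        rw [hh]
      · -- every shifted pair slices inside rest2
        rw [← ih, List.map_map]
        apply List.map_congr_left
        intro p _
        simp only [Function.comp]
        have hd : (r :: rest).drop (p.1 + (run.length + 1)) = rest2.drop p.1 := by
          rw [hsplit]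
          rw [show p.1 + (run.length + 1) = (r :: run).length + p.1 from by simp; omega]
          exact List.drop_length_add_append p.1
        have hsub : p.2 + (run.length + 1) - (p.1 + (run.length + 1)) = p.2 - p.1 := by omega
        rw [hd, hsub]

theorem pvPerRoute (route : Int) (l : List pvRow) :
    pvOuterA route l =
      (pvPairs l).map (fun se => pvGapB route ((l.drop se.1).take (se.2 - se.1))) := by
  rw [pvPerRouteB, pvOuterA_eq]

-- ===== VERDICT (by name: the statement is the Claim_ definition above) =====
theorem build_consecutive_gaps_spec : Claim_equal_build_consecutive_gaps := by
  intro ml _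
  unfold Spec_build_consecutive_gaps build_consecutive_gaps build_consecutive_gaps_alt
  congr 1
  funext gaps kv
  rw [pvPerRoute]
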